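-- pv_equiv track=rewrite | github.com/deesatzed/imbora | src/cli.py | _update_role_mapping_in_lines
-- ===== SOURCE A (Python) =====
-- def _update_role_mapping_in_lines(lines: list[str], role: str, model_id: str) -> list[str]:
--     if not lines:
--         return ["roles:", f"  {role}: {model_id}"]
--
--     roles_idx = None
--     roles_indent = 0
--     for idx, line in enumerate(lines):
--         stripped = line.strip()
--         if stripped.startswith("roles:"):
--             roles_idx = idx
--             roles_indent = len(line) - len(line.lstrip(" "))
--             break
--
--     if roles_idx is None:
--         appended = list(lines)
--         if appended and appended[-1].strip():
--             appended.append("")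
--         appended.extend(["roles:", f"  {role}: {model_id}"])
--         return appended
--
--     end_idx = len(lines)
--     for idx in range(roles_idx + 1, len(lines)):
--         line = lines[idx]
--         stripped = line.strip()
--         if not stripped or stripped.startswith("#"):
--             continue
--         indent = len(line) - len(line.lstrip(" "))
--         if indent <= roles_indent:
--             end_idx = idx
--             break
--
--     role_prefix = " " * (roles_indent + 2) + f"{role}:"
--     updated_lines = list(lines)
--     for idx in range(roles_idx + 1, end_idx):
--         stripped = updated_lines[idx].strip()
--         if not stripped or stripped.startswith("#"):
--             continue
--         normalized = stripped.replace("\t", " ")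
--         if normalized.startswith(f"{role}:"):
--             updated_lines[idx] = f"{' ' * (roles_indent + 2)}{role}: {model_id}"
--             return updated_lines
--
--     updated_lines.insert(end_idx, f"{role_prefix} {model_id}")
--     return updated_lines
-- ===== SOURCE B (Python) =====
-- def _update_role_mapping_in_lines(lines: list[str], role: str, model_id: str) -> list[str]:
--     # Single forward pass with explicit before-roles / inside-roles state;
--     # builds the result by slicing instead of copying + mutating.
--     if not lines:
--         return ["roles:", f"  {role}: {model_id}"]
--     header_indent = None
--     end_idx = None
--     for i, line in enumerate(lines):
--         stripped = line.strip()
--         if header_indent is None: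
--             if stripped.startswith("roles:"):
--                 header_indent = len(line) - len(line.lstrip(" "))
--         else:
--             if not stripped or stripped.startswith("#"):
--                 continue
--             if len(line) - len(line.lstrip(" ")) <= header_indent:
--                 end_idx = i
--                 break
--             if stripped.replace("\t", " ").startswith(f"{role}:"):
--                 pad = " " * (header_indent + 2)
--                 return lines[:i] + [f"{pad}{role}: {model_id}"] + lines[i + 1:]
--     if header_indent is None:
--         out = list(lines)
--         if out[-1].strip():
--             out.append("")
--         return out + ["roles:", f"  {role}: {model_id}"]
--     if end_idx is None:
--         end_idx = len(lines)
--     pad = " " * (header_indent + 2)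
--     return lines[:end_idx] + [f"{pad}{role}: {model_id}"] + lines[end_idx:]
-- ===== Notes on version B (the rewrite author's own statement) =====
-- stated objective: alternative
-- what changed: A makes three separate scans (find the roles: header, then find the block end, then re-scan the block for a matching role) and mutates a copied list; B is a single forward pass with an explicit before-roles/inside-roles state that rewrites or inserts via list slicing.
import Mathlib
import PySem

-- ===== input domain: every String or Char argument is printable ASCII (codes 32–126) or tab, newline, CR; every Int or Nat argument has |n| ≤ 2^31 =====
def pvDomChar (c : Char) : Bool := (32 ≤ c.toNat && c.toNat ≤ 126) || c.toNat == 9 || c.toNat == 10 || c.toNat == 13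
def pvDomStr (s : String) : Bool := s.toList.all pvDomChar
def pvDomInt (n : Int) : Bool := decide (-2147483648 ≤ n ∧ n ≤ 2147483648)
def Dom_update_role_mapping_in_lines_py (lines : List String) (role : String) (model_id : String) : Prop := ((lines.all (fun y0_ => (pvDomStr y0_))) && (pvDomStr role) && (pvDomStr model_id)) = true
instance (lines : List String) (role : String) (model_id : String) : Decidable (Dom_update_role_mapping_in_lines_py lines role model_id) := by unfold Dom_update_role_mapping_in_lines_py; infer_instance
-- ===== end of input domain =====

-- B replaces A's three separate scans (find header / find block end / find matching role) by one
-- forward pass with an explicit before-roles / inside-roles state, building the result by slicing;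
-- objective: alternative decomposition (same asymptotic cost, single traversal).


-- ===== PORT A =====
-- len(line) - len(line.lstrip(" ")) = number of leading ' ' characters (exact: lstrip(" ")
-- removes exactly the leading spaces, so the length difference counts them).
def pvIndentOf (l : List Char) : Nat := (l.takeWhile (· == ' ')).length

-- f"{' ' * n}{role}: {model_id}"
def pvMkLine (n : Nat) (role model_id : String) : String :=
  String.ofList (List.replicate n ' ' ++ role.toList ++ (':' :: ' ' :: model_id.toList))

-- A's first loop: first idx whose strip() startswith "roles:", with its space-indent
def pvAFindRoles : List String → Nat → Option (Nat × Nat)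
  | [], _ => none
  | l :: rest, idx =>
    if PySem.Chars.startswith (PySem.Chars.strip l.toList) "roles:".toList then
      some (idx, pvIndentOf l.toList)
    else pvAFindRoles rest (idx + 1)

-- A's second loop over range(roles_idx+1, len(lines)): first non-blank/non-comment idx with indent ≤ roles_indent, else dflt (= len(lines))
def pvAFindEnd : List String → Nat → Nat → Nat → Nat
  | [], _, _, dflt => dflt
  | l :: rest, idx, ri, dflt =>
    let s := PySem.Chars.strip l.toList
    if s = [] ∨ PySem.Chars.startswith s "#".toList then pvAFindEnd rest (idx + 1) ri dflt
    else if pvIndentOf l.toList ≤ ri then idx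
    else pvAFindEnd rest (idx + 1) ri dflt

-- A's third loop over range(roles_idx+1, end_idx) (cnt = end_idx - idx remaining steps):
-- first non-blank/non-comment idx whose tab-normalized strip startswith f"{role}:"
def pvAFindMatch (role : List Char) : List String → Nat → Nat → Option Nat
  | _, _, 0 => none
  | [], _, _ => none
  | l :: rest, idx, cnt + 1 =>
    let s := PySem.Chars.strip l.toList
    if s = [] ∨ PySem.Chars.startswith s "#".toList then pvAFindMatch role rest (idx + 1) cnt
    else if PySem.Chars.startswith (PySem.Chars.replace s ['\t'] [' ']) (role ++ [':']) then some idx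
    else pvAFindMatch role rest (idx + 1) cnt

def update_role_mapping_in_lines_py (lines : List String) (role : String) (model_id : String) : List String :=
  if lines = [] then ["roles:", pvMkLine 2 role model_id]
  else
    match pvAFindRoles lines 0 with
    | none =>
      -- appended[-1] exists (lines ≠ []); "if appended and appended[-1].strip():"
      let appended :=
        if PySem.Chars.strip (lines.getLast!).toList ≠ [] then lines ++ [""] else lines
      appended ++ ["roles:", pvMkLine 2 role model_id]
    | some (ridx, rind) =>
      let endIdx := pvAFindEnd (lines.drop (ridx + 1)) (ridx + 1) rind lines.length
      match pvAFindMatch role.toList (lines.drop (ridx + 1)) (ridx + 1) (endIdx - (ridx + 1)) with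
      | some midx => lines.set midx (pvMkLine (rind + 2) role model_id)
      | none => PySem.List.insert lines (endIdx : Int) (pvMkLine (rind + 2) role model_id)

-- ===== PORT B =====
-- Source B's single loop: state = header_indent (none ↔ before-roles); result built by slicing.
def pvBGo (lines : List String) (role model_id : String) :
    List String → Nat → Option Nat → List String
  | [], _, none =>
    (if PySem.Chars.strip (lines.getLast!).toList ≠ [] then lines ++ [""] else lines)
      ++ ["roles:", pvMkLine 2 role model_id]
  | [], _, some hi =>
    -- loop ended with end_idx still None: end_idx = len(lines)
    lines.take lines.length ++ [pvMkLine (hi + 2) role model_id] ++ lines.drop lines.length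
  | l :: rest, i, none =>
    if PySem.Chars.startswith (PySem.Chars.strip l.toList) "roles:".toList then
      pvBGo lines role model_id rest (i + 1) (some (pvIndentOf l.toList))
    else pvBGo lines role model_id rest (i + 1) none
  | l :: rest, i, some hi =>
    let s := PySem.Chars.strip l.toList
    if s = [] ∨ PySem.Chars.startswith s "#".toList then
      pvBGo lines role model_id rest (i + 1) (some hi)
    else if pvIndentOf l.toList ≤ hi then
      lines.take i ++ [pvMkLine (hi + 2) role model_id] ++ lines.drop i
    else if PySem.Chars.startswith (PySem.Chars.replace s ['\t'] [' ']) (role.toList ++ [':']) then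
      lines.take i ++ [pvMkLine (hi + 2) role model_id] ++ lines.drop (i + 1)
    else pvBGo lines role model_id rest (i + 1) (some hi)

def update_role_mapping_in_lines_py_alt (lines : List String) (role : String) (model_id : String) : List String :=
  if lines = [] then ["roles:", pvMkLine 2 role model_id]
  else pvBGo lines role model_id lines 0 none

-- ===== PRECONDITION & SPEC =====
def Spec_update_role_mapping_in_lines_py (lines : List String) (role : String) (model_id : String) (out : List String) : Prop := out = update_role_mapping_in_lines_py_alt lines role model_id
instance (lines : List String) (role : String) (model_id : String) (out : List String) : Decidable (Spec_update_role_mapping_in_lines_py lines role model_id out) := by unfold Spec_update_role_mapping_in_lines_py; infer_instance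

-- ===== CLAIM (what is proved, stated in full; the proofs are below) =====
def Claim_equal_update_role_mapping_in_lines_py : Prop := ∀ (lines : List String) (role : String) (model_id : String), Dom_update_role_mapping_in_lines_py lines role model_id → Spec_update_role_mapping_in_lines_py lines role model_id (update_role_mapping_in_lines_py lines role model_id)

-- ===== LEMMAS AND PROOFS =====

theorem pvAFindEnd_bounds : ∀ (rest : List String) (j ri d : Nat), j ≤ d → rest.length + j ≤ d →
    j ≤ pvAFindEnd rest j ri d ∧ pvAFindEnd rest j ri d ≤ d := by
  intro rest
  induction rest with
  | nil => intro j ri d h1 h2; simp [pvAFindEnd]; omega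
  | cons l rest ih =>
    intro j ri d h1 h2
    simp only [pvAFindEnd]
    split
    · have := ih (j+1) ri d (by simp at h2; omega) (by simp at h2; omega)
      omega
    · split
      · omega
      · have := ih (j+1) ri d (by simp at h2; omega) (by simp at h2; omega)
        omega

theorem pvInsert_eq (xs : List String) (i : Nat) (h : i ≤ xs.length) (x : String) :
    PySem.List.insert xs (i : Int) x = xs.take i ++ [x] ++ xs.drop i := by
  simp only [PySem.List.insert, PySem.List.sliceIndices]
  norm_num
  rw [min_eq_left (by exact_mod_cast h)]
  rw [if_neg (by omega : ¬((i : Int) < 0))]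
  simp

theorem pvSet_eq (xs : List String) (i : Nat) (h : i < xs.length) (x : String) :
    xs.set i x = xs.take i ++ [x] ++ xs.drop (i + 1) := by
  rw [List.set_eq_take_append_cons_drop]
  simp [h]

theorem pvAFindRoles_bounds : ∀ (rest : List String) (j ridx rind : Nat),
    pvAFindRoles rest j = some (ridx, rind) → j ≤ ridx ∧ ridx < j + rest.length := by
  intro rest
  induction rest with
  | nil => intro j ridx rind h; simp [pvAFindRoles] at h
  | cons l rest ih =>
    intro j ridx rind h
    simp only [pvAFindRoles] at h
    split at h
    · simp_all
    · have := ih (j+1) ridx rind h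
      simp; omega

theorem pvAFindMatch_bounds (role : List Char) : ∀ (rest : List String) (j cnt m : Nat),
    pvAFindMatch role rest j cnt = some m → j ≤ m ∧ m < j + rest.length := by
  intro rest
  induction rest with
  | nil => intro j cnt m h; cases cnt <;> simp [pvAFindMatch] at h
  | cons l rest ih =>
    intro j cnt m h
    cases cnt with
    | zero => simp [pvAFindMatch] at h
    | succ c =>
      simp only [pvAFindMatch] at h
      split at h
      · have := ih (j+1) c m h
        simp; omega
      · split at h
        · simp_all
        · have := ih (j+1) c m h
          simp; omega

-- Phase 2: after the header has been found, B's in-block scan computes exactly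
-- "first match in [j, end_idx) -> replace there; else insert at end_idx".
theorem pvPhase2 (lines : List String) (role model_id : String) (hi : Nat) :
    ∀ (suf : List String) (j : Nat), j ≤ lines.length → suf = lines.drop j →
    pvBGo lines role model_id suf j (some hi) =
      (let e := pvAFindEnd suf j hi lines.length
       match pvAFindMatch role.toList suf j (e - j) with
       | some m => lines.take m ++ [pvMkLine (hi + 2) role model_id] ++ lines.drop (m + 1)
       | none => lines.take e ++ [pvMkLine (hi + 2) role model_id] ++ lines.drop e) := by
  intro suf
  induction suf with
  | nil =>
    intro j hj hsuf
    have hjl : j = lines.length := by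
      have := List.drop_eq_nil_iff.mp hsuf.symm
      omega
    subst hjl
    simp [pvBGo, pvAFindEnd, pvAFindMatch]
  | cons l rest ih =>
    intro j hj hsuf
    have hjlt : j < lines.length := by
      by_contra hc
      have : lines.drop j = [] := List.drop_eq_nil_iff.mpr (by omega)
      rw [this] at hsuf; simp at hsuf
    have hrest : rest = lines.drop (j + 1) := by
      have : (lines.drop j).tail = rest := by rw [← hsuf]; rfl
      rw [List.tail_drop] at this; exact this.symm
    have hlen_rest : rest.length + (j + 1) ≤ lines.length := by
      rw [hrest]; simp; omega
    by_cases hb : PySem.Chars.strip l.toList = [] ∨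
        PySem.Chars.startswith (PySem.Chars.strip l.toList) "#".toList = true
    · -- blank / comment: everybody skips
      have he := pvAFindEnd_bounds rest (j+1) hi lines.length (by omega) hlen_rest
      simp only [pvBGo, pvAFindEnd, if_pos hb]
      have hcnt : pvAFindEnd rest (j+1) hi lines.length - j
          = (pvAFindEnd rest (j+1) hi lines.length - (j+1)) + 1 := by omega
      rw [hcnt]
      simp only [pvAFindMatch, if_pos hb]
      exact ih (j+1) (by omega) hrest
    · simp only [pvBGo, pvAFindEnd, if_neg hb]
      by_cases hind : pvIndentOf l.toList ≤ hi
      · -- end of block at j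
        simp only [if_pos hind]
        simp [pvAFindMatch]
      · simp only [if_neg hind]
        have he := pvAFindEnd_bounds rest (j+1) hi lines.length (by omega) hlen_rest
        have hcnt : pvAFindEnd rest (j+1) hi lines.length - j
            = (pvAFindEnd rest (j+1) hi lines.length - (j+1)) + 1 := by omega
        rw [hcnt]
        by_cases hm : PySem.Chars.startswith
            (PySem.Chars.replace (PySem.Chars.strip l.toList) ['\t'] [' ']) (role.toList ++ [':']) = true
        · simp only [if_pos hm]
          simp only [pvAFindMatch, if_neg hb, if_pos hm]
        · simp only [if_neg hm]
          simp only [pvAFindMatch, if_neg hb, if_neg hm]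
          exact ih (j+1) (by omega) hrest

-- Phase 1: before the header, B just scans; once the header is found, phase 2 applies.
theorem pvPhase1 (lines : List String) (role model_id : String) :
    ∀ (suf : List String) (j : Nat), j ≤ lines.length → suf = lines.drop j →
    pvBGo lines role model_id suf j none =
      (match pvAFindRoles suf j with
       | none =>
         (if PySem.Chars.strip (lines.getLast!).toList ≠ [] then lines ++ [""] else lines)
           ++ ["roles:", pvMkLine 2 role model_id]
       | some (ridx, rind) =>
         let e := pvAFindEnd (lines.drop (ridx + 1)) (ridx + 1) rind lines.length
         match pvAFindMatch role.toList (lines.drop (ridx + 1)) (ridx + 1) (e - (ridx + 1)) with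
         | some m => lines.take m ++ [pvMkLine (rind + 2) role model_id] ++ lines.drop (m + 1)
         | none => lines.take e ++ [pvMkLine (rind + 2) role model_id] ++ lines.drop e) := by
  intro suf
  induction suf with
  | nil =>
    intro j hj hsuf
    simp [pvBGo, pvAFindRoles]
  | cons l rest ih =>
    intro j hj hsuf
    have hjlt : j < lines.length := by
      by_contra hc
      have : lines.drop j = [] := List.drop_eq_nil_iff.mpr (by omega)
      rw [this] at hsuf; simp at hsuf
    have hrest : rest = lines.drop (j + 1) := by
      have : (lines.drop j).tail = rest := by rw [← hsuf]; rfl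
      rw [List.tail_drop] at this; exact this.symm
    by_cases hh : PySem.Chars.startswith (PySem.Chars.strip l.toList) "roles:".toList = true
    · simp only [pvBGo, pvAFindRoles, if_pos hh]
      rw [← hrest]
      exact pvPhase2 lines role model_id (pvIndentOf l.toList) rest (j+1) (by omega) hrest
    · simp only [pvBGo, pvAFindRoles, if_neg hh]
      exact ih (j+1) (by omega) hrest

-- ===== VERDICT (by name: the statement is the Claim_ definition above) =====
theorem update_role_mapping_in_lines_py_spec : Claim_equal_update_role_mapping_in_lines_py := by
  intro lines role model_id _
  unfold Spec_update_role_mapping_in_lines_py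
  unfold update_role_mapping_in_lines_py update_role_mapping_in_lines_py_alt
  by_cases hne : lines = []
  · simp [hne]
  · simp only [if_neg hne]
    have h1 := pvPhase1 lines role model_id lines 0 (Nat.zero_le _) (by simp)
    rw [h1]
    cases hfr : pvAFindRoles lines 0 with
    | none => simp
    | some p =>
      obtain ⟨ridx, rind⟩ := p
      have hridx := pvAFindRoles_bounds lines 0 ridx rind hfr
      have hdlen : (lines.drop (ridx+1)).length + (ridx + 1) ≤ lines.length := by
        simp; omega
      have he := pvAFindEnd_bounds (lines.drop (ridx+1)) (ridx+1) rind lines.length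
        (by omega) hdlen
      simp only
      cases hfm : pvAFindMatch role.toList (lines.drop (ridx+1)) (ridx+1)
          (pvAFindEnd (lines.drop (ridx+1)) (ridx+1) rind lines.length - (ridx+1)) with
      | some m =>
        have hm := pvAFindMatch_bounds role.toList (lines.drop (ridx+1)) (ridx+1) _ m hfm
        simp only [List.length_drop] at hm
        exact pvSet_eq lines m (by omega) _
      | none =>
        exact pvInsert_eq lines _ (by omega) _
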